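-- pv_equiv track=rewrite | github.com/lizazak/adventofcode | 2023/day1/advent_1.1.py | create_num
-- ===== SOURCE A (Python) =====
-- def create_num(s):
--   n = 0
--   m = 0
--   for c in s:
--     if c.isnumeric():
--       n = int(c)
--       break
--
--   for c in reversed(s):
--     if c.isnumeric():
--       m = int(c)
--       break
--
--   return n * 10 + m
-- ===== SOURCE B (Python) =====
-- def create_num(s):
--   digits = [c for c in s if c.isnumeric()]
--   if not digits:
--     return 0
--   return int(digits[0]) * 10 + int(digits[-1])
-- ===== Notes on version B (the rewrite author's own statement) =====
-- stated objective: simpler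
-- what changed: Replaces two directional early-exit scans with a single forward filter collecting all digits, then forms the result from the first and last collected digit (0 if none).
import Mathlib
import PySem

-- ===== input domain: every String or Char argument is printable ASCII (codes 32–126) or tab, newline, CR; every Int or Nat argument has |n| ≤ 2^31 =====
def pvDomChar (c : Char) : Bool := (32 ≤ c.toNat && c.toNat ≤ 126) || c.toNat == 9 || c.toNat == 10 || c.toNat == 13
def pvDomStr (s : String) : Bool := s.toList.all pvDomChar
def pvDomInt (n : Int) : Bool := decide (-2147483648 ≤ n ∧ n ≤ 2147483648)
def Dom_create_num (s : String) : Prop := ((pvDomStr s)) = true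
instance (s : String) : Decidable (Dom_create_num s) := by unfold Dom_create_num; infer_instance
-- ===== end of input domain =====

-- B replaces A's two directional early-exit scans by one forward filter of the digits,
-- reading the answer off the first and last collected digit (simpler decomposition).

-- ===== PORT A =====
-- A's 'for c in s: if c.isnumeric(): n = int(c); break' (isnumeric = isDigit on the ASCII domain)
def createNumScan : List Char → Int
  | [] => 0
  | c :: cs => if c.isDigit then ((c.toNat : Int) - 48) else createNumScan cs

def create_num (s : String) : Int :=
  createNumScan s.toList * 10 + createNumScan s.toList.reverse

-- ===== PORT B =====
def create_num_alt (s : String) : Int :=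
  match s.toList.filter Char.isDigit with
  | [] => 0
  | c :: rest => ((c.toNat : Int) - 48) * 10 + (((c :: rest).getLast (by simp)).toNat - 48)

-- ===== PRECONDITION & SPEC =====
def Spec_create_num (s : String) (out : Int) : Prop := out = create_num_alt s
instance (s : String) (out : Int) : Decidable (Spec_create_num s out) := by unfold Spec_create_num; infer_instance

-- ===== CLAIM (what is proved, stated in full; the proofs are below) =====
def Claim_equal_create_num : Prop := ∀ (s : String), Dom_create_num s → Spec_create_num s (create_num s)

-- ===== LEMMAS AND PROOFS =====
def pvDigOf : Option Char → Int
  | none => 0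
  | some c => (c.toNat : Int) - 48

theorem createNumScan_eq_head (l : List Char) :
    createNumScan l = pvDigOf (l.filter Char.isDigit).head? := by
  induction l with
  | nil => rfl
  | cons c cs ih =>
    by_cases h : c.isDigit <;> simp [createNumScan, h, pvDigOf, ih]

theorem createNumScan_rev_eq_last (l : List Char) :
    createNumScan l.reverse = pvDigOf (l.filter Char.isDigit).getLast? := by
  rw [createNumScan_eq_head, List.filter_reverse, List.head?_reverse]

-- ===== VERDICT (by name: the statement is the Claim_ definition above) =====
theorem create_num_spec : Claim_equal_create_num := by
  intro s _
  unfold Spec_create_num create_num create_num_alt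
  rw [createNumScan_eq_head, createNumScan_rev_eq_last]
  cases h : s.toList.filter Char.isDigit with
  | nil => simp [pvDigOf]
  | cons c rest =>
    rw [List.getLast?_eq_some_getLast (l := c :: rest) (by simp)]
    simp [pvDigOf]
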